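-- pv_equiv track=rewrite | github.com/swordlidev/SE-Search | verl/utils/reward_score/qa_em.py | compute_action_maxnum
-- ===== SOURCE A (Python) =====
-- def compute_action_maxnum(response):
--     """
--     return: (is valid)
--     """
--     #token_list = ['think', 'search', 'refine', 'memory', 'answer']
--     token_list = ['think', 'search', 'memory', 'answer']
--
--     max_num = 0
--     for special_tags in token_list:
--         start_token = f"<{special_tags}>"
--         end_token = f"</{special_tags}>"
--         start_count = response.count(start_token)
--         end_count = response.count(end_token)
--         max_num = max(max_num , start_count)
--         max_num = max(max_num , end_count)
--
--     return max_num
-- ===== SOURCE B (Python) =====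
-- import re
-- from collections import Counter
--
--
-- def compute_action_maxnum(response):
--     """
--     return: (is valid)
--     """
--     tag_re = re.compile(r"</?(?:think|search|memory|answer)>")
--     counts = Counter(tag_re.findall(response))
--     return max(counts.values(), default=0)
-- ===== Notes on version B (the rewrite author's own statement) =====
-- stated objective: idiomatic
-- what changed: Replaces eight separate whole-string str.count scans (one per start/end tag) by a single left-to-right re.findall pass over one alternation of the eight tag literals, feeding a Counter and taking max(values, default=0).
import Mathlib
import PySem

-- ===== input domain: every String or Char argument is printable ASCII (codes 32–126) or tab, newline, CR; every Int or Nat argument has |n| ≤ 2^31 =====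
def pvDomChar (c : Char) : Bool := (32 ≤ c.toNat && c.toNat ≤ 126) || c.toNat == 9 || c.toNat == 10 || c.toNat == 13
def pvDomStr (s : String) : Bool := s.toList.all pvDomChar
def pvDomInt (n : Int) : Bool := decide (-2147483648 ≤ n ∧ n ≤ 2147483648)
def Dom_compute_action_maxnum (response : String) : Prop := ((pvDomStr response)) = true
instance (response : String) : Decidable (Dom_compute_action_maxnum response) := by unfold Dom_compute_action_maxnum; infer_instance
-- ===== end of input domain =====

-- B replaces A's eight whole-string .count scans by one left-to-right regex-style scan feeding a Counter (objective: idiomatic single pass).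

-- ===== PORT A =====
def compute_action_maxnum (response : String) : Int :=
  ["think", "search", "memory", "answer"].foldl
    (fun max_num special_tags =>
      let start_token := "<" ++ special_tags ++ ">"
      let end_token := "</" ++ special_tags ++ ">"
      let start_count := PySem.Str.count response start_token
      let end_count := PySem.Str.count response end_token
      max (max max_num (start_count : Int)) (end_count : Int))
    0

-- ===== PORT B =====
-- the eight literal tags of Source B's alternation r"</?(?:think|search|memory|answer)>"
def pvTokens : List (List Char) :=
  ["<think>", "</think>", "<search>", "</search>", "<memory>", "</memory>", "<answer>", "</answer>"].map String.toList

-- hand port of re.findall of that literal alternation: a left-to-right scan that at each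
-- position emits the tag matching there (at most one of the eight can match at a position,
-- so alternation order is irrelevant) and resumes after it — exact for this pattern
def pvScan (cs : List Char) : List (List Char) :=
  match cs with
  | [] => []
  | c :: rest =>
    match pvTokens.find? (fun t => t.isPrefixOf (c :: rest)) with
    | some t => t :: pvScan (List.drop (t.length - 1) rest)
    | none => pvScan rest
termination_by cs.length
decreasing_by all_goals (simp [List.length_drop]; try omega)

def compute_action_maxnum_alt (response : String) : Int :=
  let found := pvScan response.toList
  let counts := PySem.Dict.counter found
  PySem.List.maxD counts.values (fun v => v) 0   -- max(counts.values(), default=0)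

-- ===== PRECONDITION & SPEC =====
def Spec_compute_action_maxnum (response : String) (out : Int) : Prop := out = compute_action_maxnum_alt response
instance (response : String) (out : Int) : Decidable (Spec_compute_action_maxnum response out) := by unfold Spec_compute_action_maxnum; infer_instance

-- ===== CLAIM (what is proved, stated in full; the proofs are below) =====
def Claim_equal_compute_action_maxnum : Prop := ∀ (response : String), Dom_compute_action_maxnum response → Spec_compute_action_maxnum response (compute_action_maxnum response)

-- ===== LEMMAS AND PROOFS =====

-- reference counter: non-overlapping occurrences of t, Python str.count style
def pvCnt (t : List Char) (cs : List Char) : Nat :=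
  match cs with
  | [] => 0
  | c :: rest =>
    if t.isPrefixOf (c :: rest) then pvCnt t (List.drop (t.length - 1) rest) + 1
    else pvCnt t rest
termination_by cs.length
decreasing_by all_goals (simp [List.length_drop]; try omega)

lemma pv_tok_facts : ∀ t ∈ pvTokens, t ≠ [] ∧ t.head? = some '<' ∧ '<' ∉ t.tail := by
  intro t ht
  simp only [pvTokens, List.mem_map, List.mem_cons, List.not_mem_nil, or_false] at ht
  obtain ⟨s, hs, rfl⟩ := ht
  rcases hs with rfl|rfl|rfl|rfl|rfl|rfl|rfl|rfl <;> exact ⟨by decide, by decide, by decide⟩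

lemma pv_tok_prefix : ∀ t ∈ pvTokens, ∀ u ∈ pvTokens, t.isPrefixOf u → t = u := by
  intro t ht u hu
  simp only [pvTokens, List.mem_map, List.mem_cons, List.not_mem_nil, or_false] at ht hu
  obtain ⟨s, hs, rfl⟩ := ht
  obtain ⟨s', hs', rfl⟩ := hu
  rcases hs with rfl|rfl|rfl|rfl|rfl|rfl|rfl|rfl <;>
    rcases hs' with rfl|rfl|rfl|rfl|rfl|rfl|rfl|rfl <;> decide

lemma pv_go_eq (sub : List Char) (h : sub ≠ []) :
    ∀ (fuel : Nat) (l : List Char) (acc : Nat), l.length ≤ fuel →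
      PySem.Chars.count.go sub fuel l acc = acc + pvCnt sub l := by
  intro fuel
  induction fuel with
  | zero =>
    intro l acc hl
    have hnil : l = [] := List.eq_nil_of_length_eq_zero (Nat.le_zero.mp hl)
    subst hnil
    rw [PySem.Chars.count.go.eq_def, pvCnt.eq_def]
    simp
  | succ n ih =>
    intro l acc hl
    match l with
    | [] =>
      rw [PySem.Chars.count.go.eq_def, pvCnt.eq_def]
      try simp
    | c :: r =>
      by_cases hp : sub.isPrefixOf (c :: r)
      · rw [PySem.Chars.count.go.eq_def]
        simp only [hp, if_pos]
        match sub, h with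
        | a :: sub', _ =>
          have hdrop : List.drop (a :: sub').length (c :: r) = List.drop ((a :: sub').length - 1) r := by
            simp
          rw [hdrop, ih _ (acc + 1) (by simp [List.length_drop] at hl ⊢; omega)]
          conv_rhs => rw [pvCnt.eq_def]
          simp only [hp, if_pos]
          omega
      · rw [PySem.Chars.count.go.eq_def]
        simp only [hp]
        rw [ih r acc (by simp at hl; omega)]
        conv_rhs => rw [pvCnt.eq_def]
        simp [hp]
  
lemma pv_count_eq (cs t : List Char) (h : t ≠ []) : PySem.Chars.count cs t = pvCnt t cs := by
  unfold PySem.Chars.count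
  rw [if_neg (by simp [h])]
  simpa using pv_go_eq t h cs.length cs 0 (le_refl _)

lemma pv_cnt_skip (t : List Char) (ht : t.head? = some '<') :
    ∀ (us rest : List Char), '<' ∉ us → pvCnt t (us ++ rest) = pvCnt t rest := by
  intro us
  induction us with
  | nil => simp
  | cons c us ih =>
    intro rest hno
    have hcp : t.isPrefixOf (c :: (us ++ rest)) = false := by
      match t, ht with
      | a :: t', ht =>
        have ha : a = '<' := by simpa using ht
        have hc : c ≠ '<' := by intro h; exact hno (by simp [h])
        subst ha
        simp [List.isPrefixOf]
        intro hac
        exact absurd hac.symm hc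
    have : pvCnt t (c :: (us ++ rest)) = pvCnt t (us ++ rest) := by
      rw [pvCnt.eq_def]; simp [hcp]
    rw [List.cons_append, this]
    exact ih rest (fun h => hno (List.mem_cons_of_mem _ h))

lemma pv_prefix_unique {t u cs : List Char} (ht : t ∈ pvTokens) (hu : u ∈ pvTokens)
    (h1 : t.isPrefixOf cs) (h2 : u.isPrefixOf cs) : t = u := by
  have h1' := List.isPrefixOf_iff_prefix.mp h1
  have h2' := List.isPrefixOf_iff_prefix.mp h2
  rcases List.prefix_or_prefix_of_prefix h1' h2' with h | h
  · exact pv_tok_prefix t ht u hu (List.isPrefixOf_iff_prefix.mpr h)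
  · exact (pv_tok_prefix u hu t ht (List.isPrefixOf_iff_prefix.mpr h)).symm

lemma pv_scan_mem : ∀ cs : List Char, ∀ u ∈ pvScan cs, u ∈ pvTokens := by
  intro cs
  induction cs using pvScan.induct with
  | case1 => intro u hu; rw [pvScan.eq_def] at hu; simp at hu
  | case2 c rest t hf ih =>
    intro u hu
    have he : pvScan (c :: rest) = t :: pvScan (List.drop (t.length - 1) rest) := by
      rw [pvScan.eq_def]; simp [hf]
    rw [he] at hu
    rcases List.mem_cons.mp hu with h | h
    · subst h; exact List.mem_of_find?_eq_some hf
    · exact ih u h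
  | case3 c rest hf ih =>
    intro u hu
    have he : pvScan (c :: rest) = pvScan rest := by
      rw [pvScan.eq_def]; simp [hf]
    rw [he] at hu
    exact ih u hu

lemma pv_scan_count : ∀ cs : List Char, ∀ t ∈ pvTokens, (pvScan cs).count t = pvCnt t cs := by
  intro cs
  induction cs using pvScan.induct with
  | case1 =>
    intro t ht
    rw [pvScan.eq_def, pvCnt.eq_def]; simp
  | case2 c rest u hf ih =>
    intro t ht
    have hu_mem : u ∈ pvTokens := List.mem_of_find?_eq_some hf
    have hu_pref : u.isPrefixOf (c :: rest) = true := by simpa using List.find?_some hf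
    have he : pvScan (c :: rest) = u :: pvScan (List.drop (u.length - 1) rest) := by
      rw [pvScan.eq_def]; simp [hf]
    obtain ⟨hne, hhead, htail⟩ := pv_tok_facts u hu_mem
    match u, hne with
    | a :: utail, _ =>
      obtain ⟨suffix, hsuf⟩ := List.isPrefixOf_iff_prefix.mp hu_pref
      have hrest : rest = utail ++ suffix := by
        simp at hsuf
        exact hsuf.2.symm
      have hdrop : List.drop ((a :: utail).length - 1) rest = suffix := by
        rw [hrest]; simp
      by_cases hteq : t = a :: utail
      · subst hteq
        rw [he, List.count_cons_self]
        rw [pvCnt.eq_def]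
        simp only [hu_pref, if_pos]
        rw [ih _ ht, hdrop]
      · have htp : t.isPrefixOf (c :: rest) = false := by
          cases h : t.isPrefixOf (c :: rest) with
          | false => rfl
          | true => exact absurd (pv_prefix_unique ht hu_mem h hu_pref) hteq
        rw [he, List.count_cons_of_ne (fun hh => hteq hh.symm)]
        rw [pvCnt.eq_def]
        simp only [htp]
        rw [ih t ht, hdrop]
        rw [hrest]
        rw [pv_cnt_skip t (pv_tok_facts t ht).2.1 utail suffix (by simpa using htail)]
        simp
  | case3 c rest hf ih =>
    intro t ht
    have he : pvScan (c :: rest) = pvScan rest := by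
      rw [pvScan.eq_def]; simp [hf]
    have htp : t.isPrefixOf (c :: rest) = false := by
      have h := List.find?_eq_none.mp hf t ht
      simp only [Bool.not_eq_true] at h
      exact h
    rw [he, pvCnt.eq_def]
    simp only [htp]
    exact ih t ht

lemma pv_foldl_max_le (l : List Int) (z b : Int) (h0 : z ≤ b) (h : ∀ x ∈ l, x ≤ b) :
    List.foldl max z l ≤ b := by
  induction l generalizing z with
  | nil => simpa using h0
  | cons a l ih =>
    exact ih (max z a) (max_le h0 (h a (by simp))) (fun x hx => h x (by simp [hx]))

lemma pv_max?_ne_none {α κ : Type} [LinearOrder κ] (x : α) (xs : List α) (key : α → κ) :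
    PySem.List.max? (x :: xs) key ≠ none := by
  unfold PySem.List.max?
  suffices h : ∀ (l : List α) (m : α),
      (l.foldl (fun acc y => match acc with
        | none => some y
        | some m => if key m < key y then some y else some m) (some m)) ≠ none by
    simpa using h xs x
  intro l
  induction l with
  | nil => simp
  | cons a l ih =>
    intro m
    simp only [List.foldl_cons]
    by_cases h : key m < key a
    · simpa [h] using ih a
    · simpa [h] using ih m

lemma pv_A_eq (response : String) :
    compute_action_maxnum response
      = List.foldl max 0 (pvTokens.map (fun t => (pvCnt t response.toList : Int))) := by
  have h8 : pvTokens.map (fun t => (PySem.Chars.count response.toList t : Int))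
      = pvTokens.map (fun t => (pvCnt t response.toList : Int)) := by
    apply List.map_congr_left
    intro t ht
    rw [pv_count_eq _ _ (pv_tok_facts t ht).1]
  rw [← h8]
  rfl

lemma pv_B_eq (response : String) :
    compute_action_maxnum_alt response
      = PySem.List.maxD
          ((PySem.Set.ofList (pvScan response.toList)).map
            (fun k => ((pvScan response.toList).count k : Int)))
          (fun v => v) 0 := by
  unfold compute_action_maxnum_alt
  simp [PySem.Dict.values, PySem.Dict.items_counter, List.map_map]
  rfl

lemma pv_final (cs : List Char) :
    List.foldl max 0 (pvTokens.map (fun t => (pvCnt t cs : Int)))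
      = PySem.List.maxD
          ((PySem.Set.ofList (pvScan cs)).map (fun k => ((pvScan cs).count k : Int)))
          (fun v => v) 0 := by
  set ms := pvScan cs with hms
  set vs := (PySem.Set.ofList ms).map (fun k => ((ms.count k : Int))) with hvs
  have hmaxD : PySem.List.maxD vs (fun v => v) 0 = (PySem.List.max? vs (fun v => v)).getD 0 := rfl
  cases hmx : PySem.List.max? vs (fun v => v) with
  | none =>
    have hvs_nil : vs = [] := by
      cases hv : vs with
      | nil => rfl
      | cons x xs => exact absurd (hv ▸ hmx) (pv_max?_ne_none x xs (fun v => v))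
    have hms_nil : ms = [] := by
      cases hm : ms with
      | nil => rfl
      | cons x xs =>
        have hx : x ∈ PySem.Set.ofList ms := (PySem.Set.mem_ofList ms x).mpr (by simp [hm])
        have : ((ms.count x : Int)) ∈ vs := List.mem_map_of_mem hx
        rw [hvs_nil] at this
        simp at this
    have hz : ∀ t ∈ pvTokens, (pvCnt t cs : Int) = 0 := by
      intro t ht
      rw [← pv_scan_count cs t ht, ← hms, hms_nil]
      simp
    rw [hmaxD, hmx]
    simp only [Option.getD_none]
    apply le_antisymm
    · apply pv_foldl_max_le _ _ _ (le_refl 0)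
      intro x hx
      obtain ⟨t, ht, rfl⟩ := List.mem_map.mp hx
      rw [hz t ht]
    · exact (PySem.List.le_foldl_max _ _).1
  | some m =>
    rw [hmaxD, hmx]
    simp only [Option.getD_some]
    have hm_mem : m ∈ vs := PySem.List.max?_mem hmx
    obtain ⟨k, hk, hkm⟩ := List.mem_map.mp hm_mem
    have hk_ms : k ∈ ms := (PySem.Set.mem_ofList ms k).mp hk
    apply le_antisymm
    · apply pv_foldl_max_le
      · rw [← hkm]; positivity
      · intro x hx
        obtain ⟨t, ht, rfl⟩ := List.mem_map.mp hx
        rw [← pv_scan_count cs t ht, ← hms]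
        by_cases hc : ms.count t = 0
        · rw [hc]
          rw [← hkm]
          positivity
        · have htm : t ∈ ms := List.count_pos_iff.mp (Nat.pos_of_ne_zero hc)
          have : ((ms.count t : Int)) ∈ vs :=
            List.mem_map_of_mem ((PySem.Set.mem_ofList ms t).mpr htm)
          have := PySem.List.max?_isMax hmx _ this
          simpa using this
    · have hk_tok : k ∈ pvTokens := pv_scan_mem cs k (hms ▸ hk_ms)
      have : ((pvCnt k cs : Int)) ∈ pvTokens.map (fun t => ((pvCnt t cs : Int))) :=
        List.mem_map_of_mem hk_tok
      have hle := (PySem.List.le_foldl_max (pvTokens.map (fun t => ((pvCnt t cs : Int)))) 0).2 _ this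
      have h2 : ((pvCnt k cs : Int)) = m := by
        rw [← pv_scan_count cs k hk_tok, ← hms]
        exact hkm
      rw [← h2]
      exact hle

-- ===== VERDICT (by name: the statement is the Claim_ definition above) =====
theorem compute_action_maxnum_spec : Claim_equal_compute_action_maxnum := by
  intro response _
  show compute_action_maxnum response = compute_action_maxnum_alt response
  rw [pv_A_eq, pv_B_eq, pv_final]
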